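-- pv_equiv track=rewrite | github.com/KeithCu/writeragent | plugin/modules/writer/html_math_segment.py | _tag_end
-- ===== SOURCE A (Python) =====
-- def _tag_end(s: str, start: int) -> int:
--     """Return index of ``>`` closing the tag that begins at *start*, or -1."""
--     i = start
--     in_single = False
--     in_double = False
--     while i < len(s):
--         c = s[i]
--         if c == "'" and not in_double:
--             in_single = not in_single
--         elif c == '"' and not in_single:
--             in_double = not in_double
--         elif c == ">" and not in_single and not in_double:
--             return i
--         i += 1
--     return -1
-- ===== SOURCE B (Python) =====
-- def _tag_end(s: str, start: int) -> int:
--     """Return index of ``>`` closing the tag that begins at *start*, or -1.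
--
--     Delimiter-jumping scanner: instead of stepping char by char with quote
--     flags, jump with str.find between quotes and the next '>'.
--     """
--     i = start
--     while True:
--         q1 = s.find("'", i)
--         q2 = s.find('"', i)
--         g = s.find('>', i)
--         if g == -1:
--             return -1
--         q = -1
--         if q1 != -1 and q1 < g:
--             q = q1
--         if q2 != -1 and q2 < g and (q == -1 or q2 < q):
--             q = q2
--         if q == -1:
--             return g
--         close = s.find(s[q], q + 1)
--         if close == -1:
--             return -1
--         i = close + 1
-- ===== Notes on version B (the rewrite author's own statement) =====
-- stated objective: alternative
-- what changed: Replaces the char-by-char scan with two boolean quote flags by a delimiter-jumping scanner that uses str.find to locate the next quote and the next '>' and jumps directly past each quoted region.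
-- outside the precondition, e.g. on _tag_end('a>', -1): A returns -1, B returns 1; on _tag_end('', -1): A raises IndexError, B returns -1
import Mathlib
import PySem

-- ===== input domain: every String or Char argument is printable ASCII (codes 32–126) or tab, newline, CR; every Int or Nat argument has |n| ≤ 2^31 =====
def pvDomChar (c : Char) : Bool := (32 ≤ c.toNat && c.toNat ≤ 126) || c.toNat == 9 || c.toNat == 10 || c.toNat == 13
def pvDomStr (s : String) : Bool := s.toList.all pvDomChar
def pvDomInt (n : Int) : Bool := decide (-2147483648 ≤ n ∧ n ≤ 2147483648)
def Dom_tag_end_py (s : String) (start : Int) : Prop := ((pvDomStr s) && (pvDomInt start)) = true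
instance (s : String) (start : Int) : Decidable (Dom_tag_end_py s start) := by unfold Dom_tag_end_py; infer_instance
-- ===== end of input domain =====

-- B rewrites A's char-by-char quote-flag state machine as a delimiter-jumping scanner over str.find (return-value equivalence on start ≥ 0).

-- ===== PORT A =====
-- A's while-loop: index i, two quote flags; the `none` arm of pyGet? is where Python raises IndexError (start < -len, excluded by Pre_).
def tagEndLoop (cs : List Char) (i : Int) (insgl indbl : Bool) : Int :=
  if _h : i < (cs.length : Int) then
    match PySem.List.pyGet? cs i with
    | none => -1
    | some c =>
      if c = '\'' && !indbl then tagEndLoop cs (i + 1) (!insgl) indbl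
      else if c = '"' && !insgl then tagEndLoop cs (i + 1) insgl (!indbl)
      else if c = '>' && !insgl && !indbl then i
      else tagEndLoop cs (i + 1) insgl indbl
  else -1
termination_by ((cs.length : Int) - i).toNat
decreasing_by all_goals omega

def tag_end_py (s : String) (start : Int) : Int :=
  tagEndLoop s.toList start false false

-- ===== PORT B =====
-- Source B's `while True` loop; fuel is only a totality guard (each pass jumps past a closing quote, so at most len+2 passes happen).
def tagEndJump (s : String) (fuel : Nat) (i : Int) : Int :=
  match fuel with
  | 0 => -1
  | fuel + 1 =>
    let q1 := PySem.Str.findFrom s "'" i none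
    let q2 := PySem.Str.findFrom s "\"" i none
    let g := PySem.Str.findFrom s ">" i none
    if g = -1 then -1
    else
      let qa : Int := if q1 ≠ -1 ∧ q1 < g then q1 else -1
      let qb : Int := if q2 ≠ -1 ∧ q2 < g ∧ (qa = -1 ∨ q2 < qa) then q2 else qa
      if qb = -1 then g
      else
        match PySem.Str.pyGet? s qb with
        | none => -1  -- unreachable: qb is an index str.find returned
        | some c =>
          let close := PySem.Str.findFrom s (String.ofList [c]) (qb + 1) none
          if close = -1 then -1 else tagEndJump s fuel (close + 1)

def tag_end_py_alt (s : String) (start : Int) : Int :=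
  tagEndJump s (s.toList.length + 2) start

-- ===== PRECONDITION & SPEC =====
-- Pre_ restricts to the natural domain 0 ≤ start: a negative start is outside the function's
-- purpose and triggers Python negative-index wraparound in A (e.g. A returns the sentinel -1 for
-- a '>' it found at index -1) or an IndexError when start < -len(s).
def Pre_tag_end_py (s : String) (start : Int) : Prop := 0 ≤ start
instance (s : String) (start : Int) : Decidable (Pre_tag_end_py s start) := by unfold Pre_tag_end_py; infer_instance
def pvWitness_tag_end_py : String × Int := ("<a href='x>' id=\"y\">z", 0)

def Spec_tag_end_py (s : String) (start : Int) (out : Int) : Prop := out = tag_end_py_alt s start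
instance (s : String) (start : Int) (out : Int) : Decidable (Spec_tag_end_py s start out) := by unfold Spec_tag_end_py; infer_instance

-- ===== CLAIM (what is proved, stated in full; the proofs are below) =====
def Claim_equal_tag_end_py : Prop := ∀ (s : String) (start : Int), Dom_tag_end_py s start → Pre_tag_end_py s start → Spec_tag_end_py s start (tag_end_py s start)

-- ===== LEMMAS AND PROOFS =====

-- Unfolding A's loop at a Nat index.
theorem tagEndLoop_step (cs : List Char) (k : Nat) (b1 b2 : Bool) (hk : k < cs.length) :
    tagEndLoop cs (k : Int) b1 b2 =
      if cs[k]'hk = '\'' && !b2 then tagEndLoop cs ((k + 1 : Nat) : Int) (!b1) b2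
      else if cs[k]'hk = '"' && !b1 then tagEndLoop cs ((k + 1 : Nat) : Int) b1 (!b2)
      else if cs[k]'hk = '>' && !b1 && !b2 then (k : Int)
      else tagEndLoop cs ((k + 1 : Nat) : Int) b1 b2 := by
  rw [tagEndLoop]
  have h1 : ((k : Int) < (cs.length : Int)) := by exact_mod_cast hk
  rw [dif_pos h1, PySem.List.pyGet?_natCast, List.getElem?_eq_getElem hk]
  push_cast
  rfl

theorem tagEndLoop_end (cs : List Char) (k : Nat) (b1 b2 : Bool) (hk : cs.length ≤ k) :
    tagEndLoop cs (k : Int) b1 b2 = -1 := by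
  rw [tagEndLoop, dif_neg (by exact_mod_cast Nat.not_lt.mpr hk)]

-- No '>' at or after k: A's loop returns -1 whatever the flags.
theorem tagEndLoop_no_gt (cs : List Char) (k : Nat) (b1 b2 : Bool)
    (h : ∀ j (hj : j < cs.length), k ≤ j → cs[j]'hj ≠ '>') :
    tagEndLoop cs (k : Int) b1 b2 = -1 := by
  by_cases hk : k < cs.length
  · rw [tagEndLoop_step cs k b1 b2 hk]
    have ih := fun b1 b2 => tagEndLoop_no_gt cs (k + 1) b1 b2
      (by intro j hj h1; exact h j hj (by omega))
    have hne := h k hk le_rfl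
    split_ifs with h1 h2 h3
    · exact ih (!b1) b2
    · exact ih b1 (!b2)
    · simp only [Bool.and_eq_true, decide_eq_true_eq] at h3; exact absurd h3.1.1 hne
    · exact ih b1 b2
  · exact tagEndLoop_end cs k b1 b2 (by omega)
termination_by cs.length - k

-- No closing single quote at or after k: the in-single-quote state never exits.
theorem tagEndLoop_no_close_s (cs : List Char) (k : Nat)
    (h : ∀ j (hj : j < cs.length), k ≤ j → cs[j]'hj ≠ '\'') :
    tagEndLoop cs (k : Int) true false = -1 := by
  by_cases hk : k < cs.length
  · rw [tagEndLoop_step cs k true false hk]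
    have ih := tagEndLoop_no_close_s cs (k + 1)
      (by intro j hj h1; exact h j hj (by omega))
    have hne := h k hk le_rfl
    split_ifs with h1 h2 h3 <;> simp_all
  · exact tagEndLoop_end cs k true false (by omega)
termination_by cs.length - k

-- Same for the in-double-quote state.
theorem tagEndLoop_no_close_d (cs : List Char) (k : Nat)
    (h : ∀ j (hj : j < cs.length), k ≤ j → cs[j]'hj ≠ '"') :
    tagEndLoop cs (k : Int) false true = -1 := by
  by_cases hk : k < cs.length
  · rw [tagEndLoop_step cs k false true hk]
    have ih := tagEndLoop_no_close_d cs (k + 1)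
      (by intro j hj h1; exact h j hj (by omega))
    have hne := h k hk le_rfl
    split_ifs with h1 h2 h3 <;> simp_all
  · exact tagEndLoop_end cs k false true (by omega)
termination_by cs.length - k

-- Segment [k, m) free of ', ", >: the unquoted scan just walks across it.
theorem tagEndLoop_skip_clean (cs : List Char) (k m : Nat) (hkm : k ≤ m)
    (h : ∀ j (hj : j < cs.length), k ≤ j → j < m → cs[j]'hj ≠ '\'' ∧ cs[j]'hj ≠ '"' ∧ cs[j]'hj ≠ '>') :
    tagEndLoop cs (k : Int) false false = tagEndLoop cs (m : Int) false false := by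
  by_cases hk : k < m
  · by_cases hkl : k < cs.length
    · obtain ⟨ha, hb, hc⟩ := h k hkl le_rfl hk
      rw [tagEndLoop_step cs k false false hkl]
      have ih := tagEndLoop_skip_clean cs (k + 1) m (by omega)
        (by intro j hj h1 h2; exact h j hj (by omega) h2)
      split_ifs with h1 h2 h3 <;> simp_all
    · rw [tagEndLoop_end cs k false false (by omega), tagEndLoop_end cs m false false (by omega)]
  · have : k = m := by omega
    rw [this]
termination_by m - k

-- In-quote segment [k, m) free of the quote char, closing quote at m: the quoted scan exits to m+1.
theorem tagEndLoop_skip_quote_s (cs : List Char) (k m : Nat) (hkm : k ≤ m) (hm : m < cs.length)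
    (h : ∀ j (hj : j < cs.length), k ≤ j → j < m → cs[j]'hj ≠ '\'') (hc : cs[m]'hm = '\'') :
    tagEndLoop cs (k : Int) true false = tagEndLoop cs ((m + 1 : Nat) : Int) false false := by
  have hkl : k < cs.length := by omega
  rw [tagEndLoop_step cs k true false hkl]
  by_cases hk : k < m
  · have hne := h k hkl le_rfl hk
    have ih := tagEndLoop_skip_quote_s cs (k + 1) m (by omega) hm
      (by intro j hj h1 h2; exact h j hj (by omega) h2) hc
    split_ifs with h1 h2 <;> simp_all
  · have hkm' : k = m := by omega
    subst hkm'
    simp [hc]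
termination_by m - k

theorem tagEndLoop_skip_quote_d (cs : List Char) (k m : Nat) (hkm : k ≤ m) (hm : m < cs.length)
    (h : ∀ j (hj : j < cs.length), k ≤ j → j < m → cs[j]'hj ≠ '"') (hc : cs[m]'hm = '"') :
    tagEndLoop cs (k : Int) false true = tagEndLoop cs ((m + 1 : Nat) : Int) false false := by
  have hkl : k < cs.length := by omega
  rw [tagEndLoop_step cs k false true hkl]
  by_cases hk : k < m
  · have hne := h k hkl le_rfl hk
    have ih := tagEndLoop_skip_quote_d cs (k + 1) m (by omega) hm
      (by intro j hj h1 h2; exact h j hj (by omega) h2) hc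
    split_ifs with h1 h2 <;> simp_all
  · have hkm' : k = m := by omega
    subst hkm'
    simp [hc]
termination_by m - k

-- Bridging: a singleton pattern is a prefix of cs.drop j iff cs[j]? = some c.
theorem singleton_prefix_drop (cs : List Char) (c : Char) (j : Nat) :
    [c] <+: cs.drop j ↔ cs[j]? = some c := by
  constructor
  · rintro ⟨t, ht⟩
    have h : (cs.drop j).head? = some c := by rw [← ht]; rfl
    rwa [List.head?_drop] at h
  · intro hj
    have h : (cs.drop j).head? = some c := by rwa [List.head?_drop]
    cases hd : cs.drop j with
    | nil => rw [hd] at h; exact absurd h (by simp)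
    | cons x t =>
      rw [hd] at h
      simp only [List.head?_cons, Option.some.injEq] at h
      exact ⟨t, by rw [h]; rfl⟩

theorem singleton_infix (cs : List Char) (c : Char) (k : Nat) :
    [c] <:+: cs.drop k ↔ ∃ j, k ≤ j ∧ cs[j]? = some c := by
  constructor
  · intro h
    obtain ⟨j0, hj0⟩ := (PySem.Chars.exists_prefix_drop_iff_isIn [c] (cs.drop k)).mpr
      ((PySem.Chars.isIn_iff_infix [c] (cs.drop k)).mpr h)
    rw [List.drop_drop] at hj0
    exact ⟨k + j0, by omega, (singleton_prefix_drop cs c (k + j0)).mp hj0⟩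
  · rintro ⟨j, hkj, hj⟩
    have h1 : [c] <+: (cs.drop k).drop (j - k) := by
      rw [List.drop_drop, show k + (j - k) = j by omega]
      exact (singleton_prefix_drop cs c j).mpr hj
    exact h1.isInfix.trans (List.drop_suffix (j - k) (cs.drop k)).isInfix

-- find of a single char, packaged: -1 iff no occurrence at or after k.
theorem find_char_none (cs : List Char) (c : Char) (k : Nat) (hk : k ≤ cs.length) :
    PySem.Chars.findFrom cs [c] (k : Int) none = -1 ↔
      ∀ j (hj : j < cs.length), k ≤ j → cs[j]'hj ≠ c := by
  rw [PySem.Chars.findFrom_natCast_eq_neg_one_iff cs [c] k hk, singleton_infix]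
  constructor
  · intro h j hj hkj hc
    exact h ⟨j, hkj, by rw [List.getElem?_eq_getElem hj, hc]⟩
  · rintro h ⟨j, hkj, hj⟩
    have hjl : j < cs.length := by
      by_contra hh
      rw [List.getElem?_eq_none (by omega)] at hj; simp at hj
    rw [List.getElem?_eq_getElem hjl, Option.some.injEq] at hj
    exact h j hjl hkj hj

-- …and otherwise it is the first occurrence at or after k.
theorem find_char_spec (cs : List Char) (c : Char) (k : Nat) (hk : k ≤ cs.length)
    (h : PySem.Chars.findFrom cs [c] (k : Int) none ≠ -1) :
    ∃ r : Nat, PySem.Chars.findFrom cs [c] (k : Int) none = (r : Int) ∧ k ≤ r ∧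
      ∃ hr : r < cs.length, cs[r]'hr = c ∧
        ∀ j (hj : j < cs.length), k ≤ j → j < r → cs[j]'hj ≠ c := by
  obtain ⟨h1, h2, h3⟩ := PySem.Chars.findFrom_natCast_spec cs [c] k hk h
  set v := PySem.Chars.findFrom cs [c] (k : Int) none with hv
  have hv0 : (0 : Int) ≤ v := le_trans (by exact_mod_cast Nat.zero_le k) h1
  refine ⟨v.toNat, by omega, by omega, ?_⟩
  have hpre := (singleton_prefix_drop cs c v.toNat).mp h2
  have hlt : v.toNat < cs.length := by
    by_contra hh
    rw [List.getElem?_eq_none (by omega)] at hpre; simp at hpre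
  rw [List.getElem?_eq_getElem hlt, Option.some.injEq] at hpre
  refine ⟨hlt, hpre, ?_⟩
  intro j hj hkj hjr hc
  exact h3 j hkj hjr ((singleton_prefix_drop cs c j).mpr (by rw [List.getElem?_eq_getElem hj, hc]))

theorem findFrom_of_gt_len (cs : List Char) (sub : List Char) (i : Int)
    (h : (cs.length : Int) < i) : PySem.Chars.findFrom cs sub i none = -1 := by
  rw [PySem.Chars.findFrom]
  simp only
  split_ifs with h1 h2 h3 <;> first | rfl | omega

-- B's single-quote close-and-continue branch equals A's scan from k (IH is the fuel induction hypothesis).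
theorem close_branch_s (s : String) (fuel : Nat) (k rq : Nat)
    (IH : ∀ k' : Nat, k' ≤ s.toList.length → s.toList.length < fuel + k' →
      tagEndJump s fuel ((k' : Nat) : Int) = tagEndLoop s.toList ((k' : Nat) : Int) false false)
    (hkq : k ≤ rq) (hrq : rq < s.toList.length) (hqc : s.toList[rq]'hrq = '\'')
    (hclean : ∀ j (hj : j < s.toList.length), k ≤ j → j < rq →
      s.toList[j]'hj ≠ '\'' ∧ s.toList[j]'hj ≠ '"' ∧ s.toList[j]'hj ≠ '>')
    (hfuel : s.toList.length ≤ fuel + k) :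
    (if PySem.Chars.findFrom s.toList ['\''] ((rq : Int) + 1) none = -1 then (-1 : Int)
     else tagEndJump s fuel (PySem.Chars.findFrom s.toList ['\''] ((rq : Int) + 1) none + 1)) =
    tagEndLoop s.toList (k : Int) false false := by
  have hA1 : tagEndLoop s.toList (k : Int) false false = tagEndLoop s.toList ((rq : Nat) : Int) false false :=
    tagEndLoop_skip_clean s.toList k rq hkq hclean
  have hA2 : tagEndLoop s.toList ((rq : Nat) : Int) false false =
      tagEndLoop s.toList ((rq + 1 : Nat) : Int) true false := by
    rw [tagEndLoop_step s.toList rq false false hrq]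
    simp [hqc]
  have hcast : ((rq : Int) + 1) = ((rq + 1 : Nat) : Int) := by push_cast; ring
  rw [hcast]
  by_cases hcl : PySem.Chars.findFrom s.toList ['\''] ((rq + 1 : Nat) : Int) none = -1
  · rw [if_pos hcl, hA1, hA2,
      tagEndLoop_no_close_s s.toList (rq + 1) ((find_char_none s.toList '\'' (rq + 1) (by omega)).mp hcl)]
  · rw [if_neg hcl]
    obtain ⟨rc, hceq, hqc1, hrcl, hcc, hcfirst⟩ := find_char_spec s.toList '\'' (rq + 1) (by omega) hcl
    rw [hceq, show ((rc : Int) + 1) = ((rc + 1 : Nat) : Int) by push_cast; ring,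
      IH (rc + 1) (by omega) (by omega), hA1, hA2,
      tagEndLoop_skip_quote_s s.toList (rq + 1) rc hqc1 hrcl hcfirst hcc]

-- Symmetric double-quote branch.
theorem close_branch_d (s : String) (fuel : Nat) (k rq : Nat)
    (IH : ∀ k' : Nat, k' ≤ s.toList.length → s.toList.length < fuel + k' →
      tagEndJump s fuel ((k' : Nat) : Int) = tagEndLoop s.toList ((k' : Nat) : Int) false false)
    (hkq : k ≤ rq) (hrq : rq < s.toList.length) (hqc : s.toList[rq]'hrq = '"')
    (hclean : ∀ j (hj : j < s.toList.length), k ≤ j → j < rq →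
      s.toList[j]'hj ≠ '\'' ∧ s.toList[j]'hj ≠ '"' ∧ s.toList[j]'hj ≠ '>')
    (hfuel : s.toList.length ≤ fuel + k) :
    (if PySem.Chars.findFrom s.toList ['"'] ((rq : Int) + 1) none = -1 then (-1 : Int)
     else tagEndJump s fuel (PySem.Chars.findFrom s.toList ['"'] ((rq : Int) + 1) none + 1)) =
    tagEndLoop s.toList (k : Int) false false := by
  have hA1 : tagEndLoop s.toList (k : Int) false false = tagEndLoop s.toList ((rq : Nat) : Int) false false :=
    tagEndLoop_skip_clean s.toList k rq hkq hclean
  have hA2 : tagEndLoop s.toList ((rq : Nat) : Int) false false =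
      tagEndLoop s.toList ((rq + 1 : Nat) : Int) false true := by
    rw [tagEndLoop_step s.toList rq false false hrq]
    simp [hqc]
  have hcast : ((rq : Int) + 1) = ((rq + 1 : Nat) : Int) := by push_cast; ring
  rw [hcast]
  by_cases hcl : PySem.Chars.findFrom s.toList ['"'] ((rq + 1 : Nat) : Int) none = -1
  · rw [if_pos hcl, hA1, hA2,
      tagEndLoop_no_close_d s.toList (rq + 1) ((find_char_none s.toList '"' (rq + 1) (by omega)).mp hcl)]
  · rw [if_neg hcl]
    obtain ⟨rc, hceq, hqc1, hrcl, hcc, hcfirst⟩ := find_char_spec s.toList '"' (rq + 1) (by omega) hcl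
    rw [hceq, show ((rc : Int) + 1) = ((rc + 1 : Nat) : Int) by push_cast; ring,
      IH (rc + 1) (by omega) (by omega), hA1, hA2,
      tagEndLoop_skip_quote_d s.toList (rq + 1) rc hqc1 hrcl hcfirst hcc]

-- Main loop equivalence, by induction on fuel.
theorem jump_eq_loop (s : String) (fuel : Nat) : ∀ (k : Nat), k ≤ s.toList.length →
    s.toList.length < fuel + k →
    tagEndJump s fuel (k : Int) = tagEndLoop s.toList (k : Int) false false := by
  induction fuel with
  | zero => intro k hk hfuel; omega
  | succ fuel IH =>
    intro k hk hfuel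
    rw [tagEndJump]
    simp only [PySem.Str.findFrom_eq, PySem.Str.pyGet?_eq, PySem.Chars.pyGet?_eq_listPyGet?]
    rw [show ((">" : String).toList) = ['>'] from rfl,
      show (("'" : String).toList) = ['\''] from rfl,
      show (("\"" : String).toList) = ['"'] from rfl]
    by_cases hg : PySem.Chars.findFrom s.toList ['>'] (k : Int) none = -1
    · rw [if_pos hg]
      exact (tagEndLoop_no_gt s.toList k false false ((find_char_none s.toList '>' k hk).mp hg)).symm
    · rw [if_neg hg]
      obtain ⟨rg, hgeq, hkrg, hrgl, hgc, hgfirst⟩ := find_char_spec s.toList '>' k hk hg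
      rw [hgeq]
      have hAg : tagEndLoop s.toList (rg : Int) false false = (rg : Int) := by
        rw [tagEndLoop_step s.toList rg false false hrgl]; simp [hgc]
      by_cases h1 : PySem.Chars.findFrom s.toList ['\''] (k : Int) none = -1
      · -- no single quote at all
        have hno1 := (find_char_none s.toList '\'' k hk).mp h1
        rw [h1, if_neg (show ¬(¬(-1 : Int) = -1 ∧ (-1 : Int) < (rg : Int)) from by omega)]
        by_cases h2 : PySem.Chars.findFrom s.toList ['"'] (k : Int) none = -1
        · have hno2 := (find_char_none s.toList '"' k hk).mp h2
          rw [h2, if_neg (show ¬(¬(-1 : Int) = -1 ∧ (-1 : Int) < (rg : Int) ∧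
              ((-1 : Int) = -1 ∨ (-1 : Int) < -1)) from by omega),
            if_pos (show (-1 : Int) = -1 from rfl),
            tagEndLoop_skip_clean s.toList k rg hkrg
              (fun j hj hkj hjr => ⟨hno1 j hj hkj, hno2 j hj hkj, hgfirst j hj hkj hjr⟩), hAg]
        · obtain ⟨r2, h2eq, hkr2, hr2l, h2c, h2first⟩ := find_char_spec s.toList '"' k hk h2
          rw [h2eq]
          by_cases h2g : r2 < rg
          · rw [if_pos (show ¬(r2 : Int) = -1 ∧ (r2 : Int) < (rg : Int) ∧
                ((-1 : Int) = -1 ∨ (r2 : Int) < -1) from ⟨by omega, by omega, Or.inl rfl⟩),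
              if_neg (show ¬(r2 : Int) = -1 from by omega),
              PySem.List.pyGet?_natCast, List.getElem?_eq_getElem hr2l, h2c]
            exact close_branch_d s fuel k r2 IH hkr2 hr2l h2c
              (fun j hj hkj hjr => ⟨hno1 j hj hkj, h2first j hj hkj hjr, hgfirst j hj hkj (by omega)⟩)
              (by omega)
          · rw [if_neg (show ¬(¬(r2 : Int) = -1 ∧ (r2 : Int) < (rg : Int) ∧
                ((-1 : Int) = -1 ∨ (r2 : Int) < -1)) from by omega),
              if_pos (show (-1 : Int) = -1 from rfl),
              tagEndLoop_skip_clean s.toList k rg hkrg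
                (fun j hj hkj hjr => ⟨hno1 j hj hkj, h2first j hj hkj (by omega), hgfirst j hj hkj hjr⟩),
              hAg]
      · obtain ⟨r1, h1eq, hkr1, hr1l, h1c, h1first⟩ := find_char_spec s.toList '\'' k hk h1
        rw [h1eq]
        by_cases h1g : r1 < rg
        · -- single quote occurs before '>'
          rw [if_pos (show ¬(r1 : Int) = -1 ∧ (r1 : Int) < (rg : Int) from ⟨by omega, by omega⟩)]
          by_cases h2 : PySem.Chars.findFrom s.toList ['"'] (k : Int) none = -1
          · have hno2 := (find_char_none s.toList '"' k hk).mp h2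
            rw [h2, if_neg (show ¬(¬(-1 : Int) = -1 ∧ (-1 : Int) < (rg : Int) ∧
                ((r1 : Int) = -1 ∨ (-1 : Int) < (r1 : Int))) from by omega),
              if_neg (show ¬(r1 : Int) = -1 from by omega),
              PySem.List.pyGet?_natCast, List.getElem?_eq_getElem hr1l, h1c]
            exact close_branch_s s fuel k r1 IH hkr1 hr1l h1c
              (fun j hj hkj hjr => ⟨h1first j hj hkj hjr, hno2 j hj hkj, hgfirst j hj hkj (by omega)⟩)
              (by omega)
          · obtain ⟨r2, h2eq, hkr2, hr2l, h2c, h2first⟩ := find_char_spec s.toList '"' k hk h2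
            rw [h2eq]
            by_cases h21 : r2 < r1
            · -- double quote first
              rw [if_pos (show ¬(r2 : Int) = -1 ∧ (r2 : Int) < (rg : Int) ∧
                  ((r1 : Int) = -1 ∨ (r2 : Int) < (r1 : Int)) from
                  ⟨by omega, by omega, Or.inr (by omega)⟩),
                if_neg (show ¬(r2 : Int) = -1 from by omega),
                PySem.List.pyGet?_natCast, List.getElem?_eq_getElem hr2l, h2c]
              exact close_branch_d s fuel k r2 IH hkr2 hr2l h2c
                (fun j hj hkj hjr => ⟨h1first j hj hkj (by omega), h2first j hj hkj hjr,
                  hgfirst j hj hkj (by omega)⟩)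
                (by omega)
            · -- single quote first
              rw [if_neg (show ¬(¬(r2 : Int) = -1 ∧ (r2 : Int) < (rg : Int) ∧
                  ((r1 : Int) = -1 ∨ (r2 : Int) < (r1 : Int))) from by omega),
                if_neg (show ¬(r1 : Int) = -1 from by omega),
                PySem.List.pyGet?_natCast, List.getElem?_eq_getElem hr1l, h1c]
              exact close_branch_s s fuel k r1 IH hkr1 hr1l h1c
                (fun j hj hkj hjr => ⟨h1first j hj hkj hjr, h2first j hj hkj (by omega),
                  hgfirst j hj hkj (by omega)⟩)
                (by omega)
        · -- single quote only at or after '>'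
          rw [if_neg (show ¬(¬(r1 : Int) = -1 ∧ (r1 : Int) < (rg : Int)) from by omega)]
          by_cases h2 : PySem.Chars.findFrom s.toList ['"'] (k : Int) none = -1
          · have hno2 := (find_char_none s.toList '"' k hk).mp h2
            rw [h2, if_neg (show ¬(¬(-1 : Int) = -1 ∧ (-1 : Int) < (rg : Int) ∧
                ((-1 : Int) = -1 ∨ (-1 : Int) < -1)) from by omega),
              if_pos (show (-1 : Int) = -1 from rfl),
              tagEndLoop_skip_clean s.toList k rg hkrg
                (fun j hj hkj hjr => ⟨h1first j hj hkj (by omega), hno2 j hj hkj, hgfirst j hj hkj hjr⟩),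
              hAg]
          · obtain ⟨r2, h2eq, hkr2, hr2l, h2c, h2first⟩ := find_char_spec s.toList '"' k hk h2
            rw [h2eq]
            by_cases h2g : r2 < rg
            · rw [if_pos (show ¬(r2 : Int) = -1 ∧ (r2 : Int) < (rg : Int) ∧
                  ((-1 : Int) = -1 ∨ (r2 : Int) < -1) from ⟨by omega, by omega, Or.inl rfl⟩),
                if_neg (show ¬(r2 : Int) = -1 from by omega),
                PySem.List.pyGet?_natCast, List.getElem?_eq_getElem hr2l, h2c]
              exact close_branch_d s fuel k r2 IH hkr2 hr2l h2c
                (fun j hj hkj hjr => ⟨h1first j hj hkj (by omega), h2first j hj hkj hjr,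
                  hgfirst j hj hkj (by omega)⟩)
                (by omega)
            · rw [if_neg (show ¬(¬(r2 : Int) = -1 ∧ (r2 : Int) < (rg : Int) ∧
                  ((-1 : Int) = -1 ∨ (r2 : Int) < -1)) from by omega),
                if_pos (show (-1 : Int) = -1 from rfl),
                tagEndLoop_skip_clean s.toList k rg hkrg
                  (fun j hj hkj hjr => ⟨h1first j hj hkj (by omega), h2first j hj hkj (by omega),
                    hgfirst j hj hkj hjr⟩),
                hAg]

-- ===== VERDICT (by name: the statement is the Claim_ definition above) =====
theorem tag_end_py_spec : Claim_equal_tag_end_py := by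
  intro s start _hdom hpre
  unfold Spec_tag_end_py tag_end_py tag_end_py_alt
  have hstart : start = ((start.toNat : Nat) : Int) := (Int.toNat_of_nonneg hpre).symm
  rw [hstart]
  by_cases hk : start.toNat ≤ s.toList.length
  · exact (jump_eq_loop s (s.toList.length + 2) start.toNat hk (by omega)).symm
  · rw [tagEndLoop_end s.toList start.toNat false false (by omega), tagEndJump]
    simp only [PySem.Str.findFrom_eq]
    rw [show ((">" : String).toList) = ['>'] from rfl,
      findFrom_of_gt_len s.toList ['>'] _ (by exact_mod_cast (by omega : s.toList.length < start.toNat)),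
      if_pos rfl]
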